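-- pv_equiv track=rewrite | github.com/jmvictor5656/leetcode | linked_list/happy_number.py | get_multiple
-- ===== SOURCE A (Python) =====
-- def get_multiple(num, hop, dp):
--     """
--     hop -> n_times u want to repeat
--     """
--     while hop:
--         digit_list = list(map(int, list(str(num))))
--         if num not in dp:
--             dp[num] = sum([n**2 for n in digit_list])
--         num = dp[num]
--         hop -=1
--     return num
-- ===== SOURCE B (Python) =====
-- def get_multiple(num, hop, dp):
--     """
--     hop -> n_times u want to repeat
--     """
--     # Same return value as A wherever A returns; like A, fills dp in place.
--     # Detects the first repeated value, then jumps the remaining hops modulo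
--     # the cycle length instead of walking them one by one.
--     seen = {}
--     step = 0
--     while step < hop:
--         if num in seen:
--             cycle = step - seen[num]
--             rem = (hop - step) % cycle
--             for _ in range(rem):
--                 num = dp[num]
--             return num
--         seen[num] = step
--         if num not in dp:
--             dp[num] = sum(int(c) ** 2 for c in str(num))
--         num = dp[num]
--         step += 1
--     return num
-- ===== Notes on version B (the rewrite author's own statement) =====
-- stated objective: faster
-- what changed: B records each value's first step in a 'seen' dict, and on the first repeat jumps the remaining hops modulo the cycle length (then walks only (hop-step) % cycle lookups) instead of iterating all hop steps; the digit-square sum is computed only on a cache miss.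
-- outside the precondition, e.g. on get_multiple(5, 1, {5: -3}): A returns -3, B returns -3
import Mathlib
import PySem

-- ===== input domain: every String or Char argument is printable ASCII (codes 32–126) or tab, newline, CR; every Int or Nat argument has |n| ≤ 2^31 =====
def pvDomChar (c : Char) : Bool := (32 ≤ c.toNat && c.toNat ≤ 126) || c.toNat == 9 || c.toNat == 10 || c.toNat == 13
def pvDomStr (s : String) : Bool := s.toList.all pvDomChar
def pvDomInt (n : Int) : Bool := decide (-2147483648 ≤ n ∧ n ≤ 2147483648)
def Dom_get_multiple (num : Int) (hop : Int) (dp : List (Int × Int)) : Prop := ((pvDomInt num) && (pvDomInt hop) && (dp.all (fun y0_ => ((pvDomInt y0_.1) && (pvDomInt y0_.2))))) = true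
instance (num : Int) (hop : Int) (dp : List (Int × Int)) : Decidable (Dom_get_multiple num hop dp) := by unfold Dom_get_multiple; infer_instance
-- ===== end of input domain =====

-- B replaces A's hop-by-hop walk by cycle detection: it jumps the remaining hops modulo the
-- cycle length (objective: faster). Like A, B fills the dp cache in place with the same entries;
-- the equivalence proved here is about the return value.

-- ===== PORT A =====
-- list(map(int, list(str(num)))) : each char of str(num) through int(); none models a ValueError
def pvDigitsA? (num : Int) : Option (List Int) :=
  (PySem.Int.toChars num).mapM (fun c => PySem.Int.ofChars? [c])

-- the `while hop:` loop; fuel hop.toNat is the exact number of iterations for hop ≥ 0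
-- (for hop < 0 the Python loop never terminates: excluded by Pre_); none models a ValueError
def pvLoopA : Nat → Int → PySem.Dict Int Int → Option Int
  | 0, num, _ => some num
  | f + 1, num, dp =>
    match pvDigitsA? num with
    | none => none
    | some digit_list =>
      let dp' := if dp.contains num then dp
                 else dp.insert num ((digit_list.map (fun n => n ^ 2)).foldl (· + ·) 0)
      match dp'.get? num with
      | none => none          -- unreachable: num was just cached
      | some v => pvLoopA f v dp'

def get_multiple (num : Int) (hop : Int) (dp : List (Int × Int)) : Int :=
  (pvLoopA hop.toNat num (PySem.Dict.mk dp)).getD num   -- .getD only reached outside Pre_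

-- ===== PORT B =====
-- int(c) for c in str(num), as in Source B's generator; none models a ValueError
def pvDigitsB? (num : Int) : Option (List Int) :=
  (PySem.Int.toChars num).mapM (fun c => PySem.Int.ofChars? [c])

-- `for _ in range(rem): num = dp[num]`; the key is always present when this runs
-- (every jumped value was seen, hence cached), so getD is exact there
def pvJump : Nat → Int → PySem.Dict Int Int → Int
  | 0, num, _ => num
  | r + 1, num, dp => pvJump r (dp.getD num 0) dp

-- Source B's `while step < hop` loop; it runs at most hop.toNat times (step grows by 1 per pass)
def pvLoopB : Nat → Int → Int → Int → PySem.Dict Int Int → PySem.Dict Int Int → Option Int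
  | 0, num, _, _, _, _ => some num
  | f + 1, num, step, hop, dp, seen =>
    if step < hop then
      match seen.get? num with
      | some s0 =>
        some (pvJump (PySem.Int.mod (hop - step) (step - s0)).toNat num dp)
      | none =>
        let seen' := seen.insert num step
        if dp.contains num then
          pvLoopB f (dp.getD num 0) (step + 1) hop dp seen'
        else
          match pvDigitsB? num with
          | none => none
          | some ds =>
            let dp' := dp.insert num ((ds.map (fun d => d ^ 2)).foldl (· + ·) 0)
            pvLoopB f (dp'.getD num 0) (step + 1) hop dp' seen'
    else some num

def get_multiple_alt (num : Int) (hop : Int) (dp : List (Int × Int)) : Int :=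
  (pvLoopB hop.toNat num 0 hop (PySem.Dict.mk dp) PySem.Dict.empty).getD num

-- ===== PRECONDITION & SPEC =====
-- Pre_ excludes inputs on which A does not return normally: hop < 0 (the while loop never
-- terminates) and chains that reach a negative number, on which int('-') raises ValueError.
-- Reachability is not closed-form, so for hop > 0 it conservatively also excludes dicts mapping
-- some nonnegative key to a negative value even when that entry is never reached and A returns
-- (see the cite in claim.json).
def Pre_get_multiple (num : Int) (hop : Int) (dp : List (Int × Int)) : Prop :=
  0 ≤ hop ∧ (hop = 0 ∨ (0 ≤ num ∧ ∀ p ∈ dp, 0 ≤ p.1 → 0 ≤ p.2))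
instance (num : Int) (hop : Int) (dp : List (Int × Int)) : Decidable (Pre_get_multiple num hop dp) := by unfold Pre_get_multiple; infer_instance

def pvWitness_get_multiple : Int × Int × (List (Int × Int)) := (19, 6, [(4, 16), (-3, -7)])

def Spec_get_multiple (num : Int) (hop : Int) (dp : List (Int × Int)) (out : Int) : Prop := out = get_multiple_alt num hop dp
instance (num : Int) (hop : Int) (dp : List (Int × Int)) (out : Int) : Decidable (Spec_get_multiple num hop dp out) := by unfold Spec_get_multiple; infer_instance

-- ===== CLAIM (what is proved, stated in full; the proofs are below) =====
def Claim_equal_get_multiple : Prop := ∀ (num : Int) (hop : Int) (dp : List (Int × Int)), Dom_get_multiple num hop dp → Pre_get_multiple num hop dp → Spec_get_multiple num hop dp (get_multiple num hop dp)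

-- ===== LEMMAS AND PROOFS =====

-- the cached-successor map: one Python step `num = dp[num]` once num is cached
def pvG (dp : PySem.Dict Int Int) (x : Int) : Int := dp.getD x 0

-- dp maps nonnegative keys to nonnegative values
def pvGood (dp : PySem.Dict Int Int) : Prop :=
  ∀ k v, dp.get? k = some v → 0 ≤ k → 0 ≤ v

-- q is a successor chain under dp (consecutive entries are cached lookups)
def pvChain (dp : PySem.Dict Int Int) (q : List Int) : Prop :=
  ∀ j : Nat, j + 1 < q.length → dp.get? (q.getD j 0) = some (q.getD (j + 1) 0)

-- every binding of seen names a position of path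
def pvSeen (seen : PySem.Dict Int Int) (path : List Int) : Prop :=
  ∀ n s, seen.get? n = some s → ∃ j : Nat, j < path.length ∧ path.getD j 0 = n ∧ s = (j : Int)

theorem pvDigitsB?_eq (n : Int) : pvDigitsB? n = pvDigitsA? n := rfl

theorem pv_toDigits_mem (m : Nat) : ∀ c ∈ Nat.toDigits 10 m, ∃ k, k < 10 ∧ c = Nat.digitChar k := by
  induction m using Nat.strong_induction_on with
  | _ m ih =>
    intro c hc
    rw [Nat.toDigits_eq_if (by norm_num)] at hc
    by_cases hm : m < 10
    · simp [hm] at hc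
      exact ⟨m, hm, hc⟩
    · simp [hm] at hc
      rcases hc with hc | hc
      · exact ih (m / 10) (Nat.div_lt_self (by omega) (by norm_num)) c hc
      · exact ⟨m % 10, Nat.mod_lt _ (by norm_num), hc⟩

theorem pv_ofChars_digitChar (k : Nat) (hk : k < 10) :
    PySem.Int.ofChars? [Nat.digitChar k] = some (k : Int) := by
  interval_cases k <;> decide

theorem pv_mapM_digits (cs : List Char)
    (h : ∀ c ∈ cs, ∃ k, k < 10 ∧ c = Nat.digitChar k) :
    ∃ ds : List Int, cs.mapM (fun c => PySem.Int.ofChars? [c]) = some ds ∧ ∀ d ∈ ds, 0 ≤ d := by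
  induction cs with
  | nil => exact ⟨[], rfl, by simp⟩
  | cons c cs ih =>
    obtain ⟨k, hk, hc⟩ := h c (by simp)
    obtain ⟨ds, hds, hnn⟩ := ih (fun c hc => h c (by simp [hc]))
    refine ⟨(k : Int) :: ds, ?_, ?_⟩
    · rw [List.mapM_cons, hc, pv_ofChars_digitChar k hk, hds]; rfl
    · intro d hd
      rcases List.mem_cons.mp hd with h | h
      · simp [h]
      · exact hnn d h

theorem pvDigitsA?_some (n : Int) (hn : 0 ≤ n) :
    ∃ ds, pvDigitsA? n = some ds ∧ ∀ d ∈ ds, 0 ≤ d := by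
  have : PySem.Int.toChars n = Nat.toDigits 10 n.toNat := by
    unfold PySem.Int.toChars
    rw [if_neg (by omega)]
  unfold pvDigitsA?
  rw [this]
  exact pv_mapM_digits _ (pv_toDigits_mem n.toNat)

theorem pv_sumsq_nonneg (ds : List Int) :
    0 ≤ (ds.map (fun d => d ^ 2)).foldl (· + ·) 0 := by
  suffices h : ∀ (a : Int), 0 ≤ a → 0 ≤ (ds.map (fun d => d ^ 2)).foldl (· + ·) a from
    h 0 le_rfl
  induction ds with
  | nil => intro a ha; simpa using ha
  | cons d ds ih =>
    intro a ha
    simp only [List.map_cons, List.foldl_cons]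
    exact ih _ (by positivity)

theorem pvJump_eq_iterate (dp : PySem.Dict Int Int) :
    ∀ (r : Nat) (x : Int), pvJump r x dp = (pvG dp)^[r] x := by
  intro r
  induction r with
  | zero => intro x; rfl
  | succ r ih =>
    intro x
    rw [Function.iterate_succ_apply]
    exact ih (pvG dp x)

-- A's loop is a pure iterate of pvG on a set of cached nonnegative values closed under pvG
theorem pvLoopA_cached (dp : PySem.Dict Int Int) (S : List Int)
    (hS : ∀ x ∈ S, 0 ≤ x ∧ ∃ v, dp.get? x = some v ∧ v ∈ S) :
    ∀ (m : Nat) (x : Int), x ∈ S → pvLoopA m x dp = some ((pvG dp)^[m] x) := by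
  intro m
  induction m with
  | zero => intro x _; rfl
  | succ m ih =>
    intro x hx
    obtain ⟨hx0, v, hv, hvS⟩ := hS x hx
    obtain ⟨ds, hds, -⟩ := pvDigitsA?_some x hx0
    have hcont : dp.contains x = true := by
      rw [PySem.Dict.contains_eq_isSome_get?, hv]; rfl
    have hg : pvG dp x = v := by simp [pvG, PySem.Dict.getD_eq_get?_getD, hv]
    rw [pvLoopA, hds]
    simp only [hcont, if_true, hv]
    rw [ih v hvS, Function.iterate_succ_apply, hg]

theorem pv_getD_append_lt (path : List Int) (x : Int) (j : Nat) (hj : j < path.length) :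
    (path ++ [x]).getD j 0 = path.getD j 0 := by
  rw [List.getD_append _ _ _ _ hj]

theorem pv_getD_append_len (path : List Int) (x : Int) :
    (path ++ [x]).getD path.length 0 = x := by
  rw [List.getD_eq_getElem _ _ (by simp)]
  simp

-- main simulation lemma: B's loop with its seen/path invariant equals A's loop
theorem pvLoopB_eq_pvLoopA :
    ∀ (f : Nat) (num step hop : Int) (dp seen : PySem.Dict Int Int) (path : List Int),
      0 ≤ num → pvGood dp → (∀ x ∈ path, 0 ≤ x) →
      step = (path.length : Int) →
      (hop - step).toNat = f →
      pvChain dp (path ++ [num]) →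
      pvSeen seen path →
      pvLoopB f num step hop dp seen = pvLoopA f num dp := by
  intro f
  induction f with
  | zero => intro num step hop dp seen path _ _ _ _ _ _ _; rfl
  | succ f ih =>
    intro num step hop dp seen path hnum hgood hpath hstep hfuel hchain hseen
    have hlt : step < hop := by omega
    rw [pvLoopB, if_pos hlt]
    cases hseeneq : seen.get? num with
    | some s0 =>
      -- cycle detected: A's remaining run is a pure iterate, reduced modulo the cycle length
      obtain ⟨j0, hj0, hpj0, hs0⟩ := hseen num s0 hseeneq
      set q : List Int := path ++ [num] with hq
      set L : Nat := path.length - j0 with hL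
      have hLpos : 0 < L := by omega
      -- iterates of pvG starting at num walk q from position j0
      have hiter : ∀ k : Nat, k ≤ L → (pvG dp)^[k] num = q.getD (j0 + k) 0 := by
        intro k
        induction k with
        | zero =>
          intro _
          simp only [Function.iterate_zero, id_eq, Nat.add_zero]
          rw [hq, pv_getD_append_lt _ _ _ hj0, hpj0]
        | succ k ihk =>
          intro hk
          have hk' : k ≤ L := by omega
          have hlen : j0 + k + 1 < q.length := by
            rw [hq]; simp; omega
          have hgstep : pvG dp (q.getD (j0 + k) 0) = q.getD (j0 + k + 1) 0 := by
            show PySem.Dict.getD dp (q.getD (j0 + k) 0) 0 = _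
            rw [PySem.Dict.getD_eq_get?_getD, hchain (j0 + k) hlen]
            rfl
          rw [Function.iterate_succ_apply', ihk hk']
          exact hgstep
      have hfix : (pvG dp)^[L] num = num := by
        rw [hiter L le_rfl]
        have hjl : j0 + L = path.length := by omega
        rw [hjl, hq, pv_getD_append_len]
      have hperiod : ∀ m : Nat, (pvG dp)^[m] num = (pvG dp)^[m % L] num := by
        intro m
        conv_lhs => rw [← Nat.mod_add_div m L]
        rw [Function.iterate_add_apply, Function.iterate_mul]
        rw [Function.iterate_fixed hfix]
      -- the cycle's values: dp is a pure cache on path.drop j0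
      have hmemS : ∀ x, x ∈ path.drop j0 ↔ ∃ j : Nat, j0 ≤ j ∧ j < path.length ∧ path.getD j 0 = x := by
        intro x
        constructor
        · intro hx
          obtain ⟨i, hix⟩ := List.mem_iff_getElem?.mp hx
          rw [List.getElem?_drop] at hix
          obtain ⟨hlt2, hEq⟩ := List.getElem?_eq_some_iff.mp hix
          refine ⟨j0 + i, by omega, hlt2, ?_⟩
          rw [List.getD_eq_getElem _ _ hlt2]
          exact hEq
        · rintro ⟨j, hj1, hj2, hjx⟩
          apply List.mem_iff_getElem?.mpr
          refine ⟨j - j0, ?_⟩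
          rw [List.getElem?_drop, show j0 + (j - j0) = j from by omega]
          rw [List.getD_eq_getElem _ _ hj2] at hjx
          rw [List.getElem?_eq_getElem hj2, hjx]
      have hS : ∀ x ∈ path.drop j0, 0 ≤ x ∧ ∃ v, dp.get? x = some v ∧ v ∈ path.drop j0 := by
        intro x hx
        refine ⟨hpath x (List.mem_of_mem_drop hx), ?_⟩
        obtain ⟨j, hj1, hj2, hjx⟩ := (hmemS x).mp hx
        have hlen : j + 1 < q.length := by rw [hq]; simp; omega
        refine ⟨q.getD (j + 1) 0, ?_, ?_⟩
        · have hc := hchain j hlen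
          rwa [hq, pv_getD_append_lt _ _ _ hj2, hjx] at hc
        · by_cases hj3 : j + 1 < path.length
          · apply (hmemS _).mpr
            exact ⟨j + 1, by omega, hj3, by rw [hq, pv_getD_append_lt _ _ _ hj3]⟩
          · have hje : j + 1 = path.length := by omega
            rw [hje, hq, pv_getD_append_len]
            apply (hmemS _).mpr
            exact ⟨j0, le_rfl, hj0, hpj0⟩
      have hnumS : num ∈ path.drop j0 := (hmemS num).mpr ⟨j0, le_rfl, hj0, hpj0⟩
      show some (pvJump (PySem.Int.mod (hop - step) (step - s0)).toNat num dp) = _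
      rw [pvLoopA_cached dp (path.drop j0) hS (f + 1) num hnumS, pvJump_eq_iterate]
      congr 1
      -- (mod (hop - step) (step - s0)).toNat = (f+1) % L
      have hmodeq : (PySem.Int.mod (hop - step) (step - s0)).toNat = (f + 1) % L := by
        have hLc : step - s0 = (L : Int) := by rw [hs0, hstep]; omega
        rw [hLc, PySem.Int.mod_eq_emod_of_pos (show (0:Int) < (L:Int) from by exact_mod_cast hLpos)]
        have h1 : hop - step = ((f + 1 : Nat) : Int) := by omega
        rw [h1]
        norm_cast
      rw [hmodeq, hperiod (f + 1)]
    | none =>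
      -- fresh value: both sides take the identical caching step
      obtain ⟨ds, hds, hnn⟩ := pvDigitsA?_some num hnum
      have hseen' : pvSeen (seen.insert num step) (path ++ [num]) := by
        intro n s hns
        rw [PySem.Dict.get?_insert] at hns
        by_cases hn : n = num
        · rw [if_pos hn] at hns
          refine ⟨path.length, by simp, ?_, by injection hns with h; omega⟩
          rw [pv_getD_append_len, hn]
        · rw [if_neg hn] at hns
          obtain ⟨j, hj, hjn, hs⟩ := hseen n s hns
          exact ⟨j, by simp; omega, by rw [pv_getD_append_lt _ _ _ hj]; exact hjn, hs⟩
      have hstep' : step + 1 = ((path ++ [num]).length : Int) := by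
        simp; omega
      have hfuel' : (hop - (step + 1)).toNat = f := by omega
      have hpath' : ∀ x ∈ path ++ [num], 0 ≤ x := by
        intro x hx
        rcases List.mem_append.mp hx with h | h
        · exact hpath x h
        · simp at h; omega
      cases hcont : dp.contains num with
      | true =>
        -- num already cached
        obtain ⟨v, hv⟩ : ∃ v, dp.get? num = some v := by
          rw [PySem.Dict.contains_eq_isSome_get?] at hcont
          exact Option.isSome_iff_exists.mp hcont
        have hgetD : dp.getD num 0 = v := by
          rw [PySem.Dict.getD_eq_get?_getD, hv]; rfl
        have hchain' : pvChain dp ((path ++ [num]) ++ [v]) := by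
          intro j hj
          simp at hj
          by_cases hjlt : j + 1 < path.length + 1
          · rw [pv_getD_append_lt (path ++ [num]) v j (by simp; omega),
                pv_getD_append_lt (path ++ [num]) v (j + 1) (by simp; omega)]
            exact hchain j (by simp; omega)
          · have hjeq : j = path.length := by omega
            subst hjeq
            rw [pv_getD_append_lt (path ++ [num]) v path.length (by simp), pv_getD_append_len path num,
                show path.length + 1 = (path ++ [num]).length from by simp,
                pv_getD_append_len (path ++ [num]) v]
            exact hv
        show pvLoopB f (dp.getD num 0) (step + 1) hop dp (seen.insert num step) = _
        rw [pvLoopA, hds]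
        simp only [hcont, if_true]
        rw [hv]
        show _ = pvLoopA f v dp
        rw [hgetD]
        exact ih v (step + 1) hop dp (seen.insert num step) (path ++ [num])
          (hgood num v hv hnum) hgood hpath' hstep' hfuel' hchain' hseen'
      | false =>
        -- num freshly cached with its digit-square sum
        set s : Int := (ds.map (fun d => d ^ 2)).foldl (· + ·) 0 with hsdef
        have hs0 : 0 ≤ s := pv_sumsq_nonneg ds
        have hget' : (dp.insert num s).get? num = some s := PySem.Dict.get?_insert_self dp num s
        have hgetD' : (dp.insert num s).getD num 0 = s := by
          rw [PySem.Dict.getD_eq_get?_getD, hget']; rfl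
        have hstable : ∀ x v, dp.get? x = some v → (dp.insert num s).get? x = some v := by
          intro x v hxv
          have hxne : x ≠ num := by
            intro h
            rw [h] at hxv
            rw [PySem.Dict.contains_eq_isSome_get?, hxv] at hcont
            simp at hcont
          rw [PySem.Dict.get?_insert_of_ne dp s hxne]
          exact hxv
        have hgood' : pvGood (dp.insert num s) := by
          intro k v hkv hk
          rw [PySem.Dict.get?_insert] at hkv
          by_cases hkn : k = num
          · rw [if_pos hkn] at hkv; injection hkv with h; omega
          · rw [if_neg hkn] at hkv; exact hgood k v hkv hk
        have hchain' : pvChain (dp.insert num s) ((path ++ [num]) ++ [s]) := by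
          intro j hj
          simp at hj
          by_cases hjlt : j + 1 < path.length + 1
          · rw [pv_getD_append_lt (path ++ [num]) s j (by simp; omega),
                pv_getD_append_lt (path ++ [num]) s (j + 1) (by simp; omega)]
            exact hstable _ _ (hchain j (by simp; omega))
          · have hjeq : j = path.length := by omega
            subst hjeq
            rw [pv_getD_append_lt (path ++ [num]) s path.length (by simp), pv_getD_append_len path num,
                show path.length + 1 = (path ++ [num]).length from by simp,
                pv_getD_append_len (path ++ [num]) s]
            exact hget'
        show (match pvDigitsB? num with
          | none => none
          | some ds =>
            let dp' := dp.insert num ((ds.map (fun d => d ^ 2)).foldl (· + ·) 0)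
            pvLoopB f (dp'.getD num 0) (step + 1) hop dp' (seen.insert num step)) = _
        rw [pvDigitsB?_eq, hds]
        show pvLoopB f ((dp.insert num s).getD num 0) (step + 1) hop (dp.insert num s) (seen.insert num step) = _
        rw [pvLoopA, hds]
        simp only [hcont, Bool.false_eq_true, if_false]
        rw [hget', hgetD']
        exact ih s (step + 1) hop (dp.insert num s) (seen.insert num step) (path ++ [num])
          hs0 hgood' hpath' hstep' hfuel' hchain' hseen'

theorem pv_good_mk (dp : List (Int × Int))
    (h : ∀ p ∈ dp, 0 ≤ p.1 → 0 ≤ p.2) : pvGood (PySem.Dict.mk dp) := by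
  induction dp with
  | nil => intro k v hkv _; simp [PySem.Dict.get?] at hkv
  | cons p rest ih =>
    intro k v hkv hk
    obtain ⟨a, b⟩ := p
    rw [PySem.Dict.get?_mk_cons] at hkv
    by_cases hak : a = k
    · rw [if_pos (by simp [hak])] at hkv
      injection hkv with hv
      have := h (a, b) (by simp)
      subst hak hv
      exact this hk
    · rw [if_neg (by simp [hak])] at hkv
      exact ih (fun p hp => h p (by simp [hp])) k v hkv hk

-- ===== VERDICT (by name: the statement is the Claim_ definition above) =====
theorem get_multiple_spec : Claim_equal_get_multiple := by
  intro num hop dp _ hpre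
  unfold Spec_get_multiple get_multiple get_multiple_alt
  obtain ⟨hhop, hcase⟩ := hpre
  rcases hcase with h0 | ⟨hnum, hdp⟩
  · subst h0; rfl
  · have h := pvLoopB_eq_pvLoopA hop.toNat num 0 hop (PySem.Dict.mk dp) PySem.Dict.empty []
      hnum (pv_good_mk dp hdp) (by simp) (by simp) (by omega)
      (by intro j hj; simp at hj) (by intro n s hns; rw [PySem.Dict.get?_empty] at hns; exact absurd hns (by simp))
    rw [h]
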